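-- pv_equiv track=rewrite | github.com/pypi-data/pypi-mirror-154 | packages/Sh-tokatan/Sh_tokatan-0.2.4-py3-none-any.whl/Shotokatan/shortcut.py | pags
-- ===== SOURCE A (Python) =====
-- def pags(content_list, range_page=12):
--     """with the list of items and the limit items in each page quoted,
--      it will return the required value of pages for all items."""
--     def paginas(file_list):
--         pag = 0
--         while True:
--             pag += 1
--             if pag * range_page >= len(file_list):
--                 break
--         return pag
--     pages = paginas(content_list)
--     return pages
-- ===== SOURCE B (Python) =====
-- def pags(content_list, range_page=12):
--     """with the list of items and the limit items in each page quoted,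
--      it will return the required value of pages for all items."""
--     return max(1, -(-len(content_list) // range_page))
-- ===== Notes on version B (the rewrite author's own statement) =====
-- stated objective: simpler
-- what changed: Replaces the counting while-loop (increment pag until pag*range_page >= len) by the closed-form ceiling division max(1, -(-len // range_page)).
-- outside the precondition, e.g. on pags([], 0): A returns 1, B raises ZeroDivisionError
import Mathlib
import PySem

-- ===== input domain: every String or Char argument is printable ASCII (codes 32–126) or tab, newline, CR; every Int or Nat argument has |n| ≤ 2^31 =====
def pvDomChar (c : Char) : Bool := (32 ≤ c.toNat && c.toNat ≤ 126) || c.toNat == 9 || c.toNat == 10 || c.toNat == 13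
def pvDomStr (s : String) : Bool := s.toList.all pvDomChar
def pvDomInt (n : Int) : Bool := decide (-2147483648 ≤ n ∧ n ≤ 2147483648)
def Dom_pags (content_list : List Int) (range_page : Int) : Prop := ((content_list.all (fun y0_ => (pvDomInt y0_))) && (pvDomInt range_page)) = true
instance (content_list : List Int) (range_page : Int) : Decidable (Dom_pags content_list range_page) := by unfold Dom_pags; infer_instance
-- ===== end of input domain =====

-- ===== PORT A =====
-- B replaces A's counting while-loop by the closed-form ceiling division max(1, ceil(len/range_page)).
-- Port of A's inner `paginas` while-loop: pag counts up from 0 until pag*range_page >= len.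
-- Fuel `len+1` suffices whenever range_page >= 1 (Pre_); on fuel exhaustion (outside Pre_,
-- where the Python loop diverges) it returns the current counter.
def pagsLoop (n range_page : Int) : Nat → Int → Int
  | 0, pag => pag + 1
  | f + 1, pag =>
      if n ≤ (pag + 1) * range_page then pag + 1
      else pagsLoop n range_page f (pag + 1)

def pags (content_list : List Int) (range_page : Int) : Int :=
  pagsLoop (content_list.length : Int) range_page (content_list.length + 1) 0

-- ===== PORT B =====
def pags_alt (content_list : List Int) (range_page : Int) : Int :=
  max 1 (-(PySem.Int.floordiv (-(content_list.length : Int)) range_page))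

-- ===== PRECONDITION & SPEC =====
-- Pre_ excludes range_page <= 0: there A's loop diverges on every input except ([], 0),
-- where A's returned 1 is an accident of the `0 >= 0` test and B raises ZeroDivisionError.
def Pre_pags (content_list : List Int) (range_page : Int) : Prop := 0 < range_page
instance (content_list : List Int) (range_page : Int) : Decidable (Pre_pags content_list range_page) := by unfold Pre_pags; infer_instance
def pvWitness_pags : List Int × Int := ([3, 1, 4], 2)
def Spec_pags (content_list : List Int) (range_page : Int) (out : Int) : Prop := out = pags_alt content_list range_page
instance (content_list : List Int) (range_page : Int) (out : Int) : Decidable (Spec_pags content_list range_page out) := by unfold Spec_pags; infer_instance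

-- ===== CLAIM (what is proved, stated in full; the proofs are below) =====
def Claim_equal_pags : Prop := ∀ (content_list : List Int) (range_page : Int), Dom_pags content_list range_page → Pre_pags content_list range_page → Spec_pags content_list range_page (pags content_list range_page)

-- ===== LEMMAS AND PROOFS =====

-- The ceiling -((-n) // rp) is the least p with n ≤ p * rp.
theorem ceil_le_iff (n rp p : Int) (h : 0 < rp) :
    -(PySem.Int.floordiv (-n) rp) ≤ p ↔ n ≤ p * rp := by
  rw [neg_le, PySem.Int.le_floordiv_iff_mul_le h]
  constructor <;> intro h' <;> nlinarith

theorem pagsLoop_eq (n rp : Int) (h : 0 < rp) :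
    ∀ (f : Nat) (pag : Int), 0 ≤ pag → pag < max 1 (-(PySem.Int.floordiv (-n) rp)) →
      max 1 (-(PySem.Int.floordiv (-n) rp)) ≤ pag + f →
      pagsLoop n rp f pag = max 1 (-(PySem.Int.floordiv (-n) rp)) := by
  intro f
  induction f with
  | zero => intro pag h0 h1 h2; omega
  | succ f ih =>
      intro pag h0 h1 h2
      simp only [pagsLoop]
      split
      · rename_i hc
        have := (ceil_le_iff n rp (pag + 1) h).mpr hc
        omega
      · rename_i hc
        have := (ceil_le_iff n rp (pag + 1) h).not.mpr hc
        exact ih (pag + 1) (by omega) (by omega) (by omega)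

-- ===== VERDICT (by name: the statement is the Claim_ definition above) =====
theorem pags_spec : Claim_equal_pags := by
  intro content_list range_page _ hpre
  unfold Spec_pags pags pags_alt
  set n : Int := (content_list.length : Int) with hn
  have hn0 : 0 ≤ n := by positivity
  have hub : -(PySem.Int.floordiv (-n) range_page) ≤ n :=
    (ceil_le_iff n range_page n hpre).mpr
      (by have h1 : (0:Int) < range_page := hpre; nlinarith)
  exact pagsLoop_eq n range_page hpre (content_list.length + 1) 0 le_rfl (by omega) (by push_cast; omega)
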